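-- pv_equiv track=rewrite | github.com/matthewdeanmartin/safari_writer | safari_slides/services.py | _split_on_headings
-- ===== SOURCE A (Python) =====
-- def _split_on_headings(lines: list[str]) -> list[list[str]]:
--     groups: list[list[str]] = []
--     current: list[str] = []
--     for line in lines:
--         stripped = line.strip()
--         if stripped.startswith("#") and current:
--             groups.append(current)
--             current = [line]
--         else:
--             current.append(line)
--     if current:
--         groups.append(current)
--     return [group for group in groups if any(item.strip() for item in group)]
-- ===== SOURCE B (Python) =====
-- def _split_on_headings(lines: list[str]) -> list[list[str]]:
--     def is_heading(line: str) -> bool: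
--         return line.strip().startswith("#")
--
--     groups: list[list[str]] = []
--     i, n = 0, len(lines)
--     while i < n:
--         j = i + 1
--         while j < n and not is_heading(lines[j]):
--             j += 1
--         groups.append(lines[i:j])
--         i = j
--     return [g for g in groups if any(item.strip() for item in g)]
-- ===== Notes on version B (the rewrite author's own statement) =====
-- stated objective: alternative
-- what changed: Replaces A's incremental accumulator (groups/current rebuilt line by line) with a two-pointer scan: from each group start, scan forward to the next heading line and slice out the whole group at once.
import Mathlib
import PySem

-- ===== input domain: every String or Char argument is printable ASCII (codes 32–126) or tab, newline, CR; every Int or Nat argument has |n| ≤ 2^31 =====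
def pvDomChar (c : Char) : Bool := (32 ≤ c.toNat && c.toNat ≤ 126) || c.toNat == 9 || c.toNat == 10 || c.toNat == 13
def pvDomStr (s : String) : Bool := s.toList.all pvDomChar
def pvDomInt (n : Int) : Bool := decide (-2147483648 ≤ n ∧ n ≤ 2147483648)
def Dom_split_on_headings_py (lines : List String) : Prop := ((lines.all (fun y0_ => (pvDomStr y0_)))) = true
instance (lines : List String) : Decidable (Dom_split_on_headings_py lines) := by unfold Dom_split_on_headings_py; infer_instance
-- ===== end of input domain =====

-- B replaces A's incremental accumulator with a two-pointer scan (next-heading slice); alternative decomposition, same cost.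
-- ===== PORT A =====
def pvHeading (line : String) : Bool :=
  PySem.Str.startswith (PySem.Str.strip line) "#"

def pvStep (st : List (List String) × List String) (line : String) :
    List (List String) × List String :=
  if pvHeading line && !st.2.isEmpty then (st.1 ++ [st.2], [line])
  else (st.1, st.2 ++ [line])

def split_on_headings_py (lines : List String) : List (List String) :=
  let st := lines.foldl pvStep ([], [])
  let groups := if st.2.isEmpty then st.1 else st.1 ++ [st.2]
  groups.filter (fun g => g.any (fun item => !(PySem.Str.strip item).toList.isEmpty))

-- ===== PORT B =====
-- inner while loop = scan to the next heading (takeWhile/dropWhile); outer while = recursion on the rest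
def pvSplitGroups : List String → List (List String)
  | [] => []
  | x :: xs =>
      (x :: xs.takeWhile (fun l => !pvHeading l)) ::
        pvSplitGroups (xs.dropWhile (fun l => !pvHeading l))
termination_by l => l.length
decreasing_by
  simpa using Nat.lt_succ_of_le (List.length_dropWhile_le _ _)

def split_on_headings_py_alt (lines : List String) : List (List String) :=
  (pvSplitGroups lines).filter (fun g => g.any (fun item => !(PySem.Str.strip item).toList.isEmpty))

-- ===== PRECONDITION & SPEC =====
def Spec_split_on_headings_py (lines : List String) (out : List (List String)) : Prop := out = split_on_headings_py_alt lines
instance (lines : List String) (out : List (List String)) : Decidable (Spec_split_on_headings_py lines out) := by unfold Spec_split_on_headings_py; infer_instance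

-- ===== CLAIM (what is proved, stated in full; the proofs are below) =====
def Claim_equal_split_on_headings_py : Prop := ∀ (lines : List String), Dom_split_on_headings_py lines → Spec_split_on_headings_py lines (split_on_headings_py lines)

-- ===== LEMMAS AND PROOFS =====

-- A's loop, rephrased: gluing the pending group `c` onto the groups of the remaining lines
def pvGlue (c : List String) : List String → List (List String)
  | [] => [c]
  | x :: xs => if pvHeading x then c :: pvGlue [x] xs else pvGlue (c ++ [x]) xs

theorem pvSnd_ne_nil : ∀ (xs : List String) (g : List (List String)) (c : List String),
    c ≠ [] → (xs.foldl pvStep (g, c)).2 ≠ [] := by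
  intro xs
  induction xs with
  | nil => intro g c hc; simpa using hc
  | cons x xs ih =>
      intro g c hc
      simp only [List.foldl_cons, pvStep]
      by_cases h : (pvHeading x && !c.isEmpty) = true
      · simp only [h, if_true]
        exact ih _ _ (by simp)
      · simp only [if_neg h]
        exact ih _ _ (by simp)

theorem pvFoldl_glue : ∀ (xs : List String) (g : List (List String)) (c : List String),
    c ≠ [] →
    (xs.foldl pvStep (g, c)).1 ++ [(xs.foldl pvStep (g, c)).2] = g ++ pvGlue c xs := by
  intro xs
  induction xs with
  | nil => intro g c hc; simp [pvGlue]
  | cons x xs ih =>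
      intro g c hc
      have hne : (!c.isEmpty) = true := by simpa using hc
      simp only [List.foldl_cons, pvStep, hne, Bool.and_true]
      by_cases h : pvHeading x = true
      · simp only [h, if_true, pvGlue]
        rw [ih _ [x] (by simp)]
        simp
      · simp only [h, Bool.false_eq_true, pvGlue, if_false]
        exact ih _ _ (by simp)

theorem pvGlue_split : ∀ (xs : List String) (c : List String),
    pvGlue c xs =
      (c ++ xs.takeWhile (fun l => !pvHeading l)) ::
        pvSplitGroups (xs.dropWhile (fun l => !pvHeading l)) := by
  intro xs
  induction xs with
  | nil => intro c; simp [pvGlue, pvSplitGroups]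
  | cons x xs ih =>
      intro c
      by_cases h : pvHeading x = true
      · simp only [pvGlue, h, if_true]
        rw [ih [x]]
        simp [h, pvSplitGroups]
      · simp only [pvGlue, h, Bool.false_eq_true, if_false]
        rw [ih (c ++ [x])]
        simp [h]

theorem pvMain (lines : List String) :
    split_on_headings_py lines = split_on_headings_py_alt lines := by
  cases lines with
  | nil => simp [split_on_headings_py, split_on_headings_py_alt, pvSplitGroups]
  | cons x xs =>
      unfold split_on_headings_py split_on_headings_py_alt
      have h0 : pvStep ([], []) x = ([], [x]) := by simp [pvStep]
      simp only [List.foldl_cons, h0]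
      have h2 := pvSnd_ne_nil xs [] [x] (by simp)
      have h1 := pvFoldl_glue xs [] [x] (by simp)
      rw [pvGlue_split] at h1
      have hie : (xs.foldl pvStep ([], [x])).2.isEmpty = false := by
        cases hh : (xs.foldl pvStep ([], [x])).2 with
        | nil => exact absurd hh h2
        | cons a b => simp
      simp only [hie, Bool.false_eq_true, if_false]
      rw [h1]
      simp [pvSplitGroups]

-- ===== VERDICT (by name: the statement is the Claim_ definition above) =====
theorem split_on_headings_py_spec : Claim_equal_split_on_headings_py := by
  intro lines _
  unfold Spec_split_on_headings_py
  exact pvMain lines
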